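-- pv_equiv track=rewrite | github.com/leodinas-hao/leetcode | src/leetcode/reorder_logs.py | order_logs
-- ===== SOURCE A (Python) =====
-- from typing import List
--
-- def order_logs(logs: List[str]) -> List[str]:
--
--   letter_logs = []
--   digit_logs = []
--
--   for log in logs:
--     if log[log.find(' ') + 1] < 'a':
--       digit_logs.append(log)
--     else:
--       letter_logs.append(log)
--
--   # sort letter logs
--   def sort_key(log: str) -> str:
--     [id, *words] = log.split()
--     words.append(id)
--     return ' '.join(words)
--
--   letter_logs.sort(key=sort_key)
--
--   return letter_logs + digit_logs
-- ===== SOURCE B (Python) =====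
-- def order_logs(logs):
--   def key(log):
--     if log[log.find(' ') + 1] < 'a':
--       return (1, '')
--     [id, *words] = log.split()
--     words.append(id)
--     return (0, ' '.join(words))
--   return sorted(logs, key=key)
-- ===== Notes on version B (the rewrite author's own statement) =====
-- stated objective: idiomatic
-- what changed: Replaces the partition loop plus separate sort of the letter logs and concatenation with one stable sorted(logs, key=...) call whose key is (0, joined-content-id) for letter logs and (1, '') for digit logs.
import Mathlib
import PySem

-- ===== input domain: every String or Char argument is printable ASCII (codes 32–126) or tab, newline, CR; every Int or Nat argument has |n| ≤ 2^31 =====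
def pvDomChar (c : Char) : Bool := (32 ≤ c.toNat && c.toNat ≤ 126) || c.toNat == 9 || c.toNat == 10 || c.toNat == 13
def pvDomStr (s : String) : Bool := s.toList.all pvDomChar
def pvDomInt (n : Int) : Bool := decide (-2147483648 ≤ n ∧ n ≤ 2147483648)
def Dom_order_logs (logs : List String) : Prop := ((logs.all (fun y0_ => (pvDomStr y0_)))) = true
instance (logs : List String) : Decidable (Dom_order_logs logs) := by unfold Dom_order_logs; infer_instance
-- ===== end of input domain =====

-- B replaces A's partition-loop + separate sort + concatenation by a single stable
-- sort of the whole list under a (rank, key) tuple key (objective: idiomatic).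


-- ===== PORT A =====
-- log[log.find(' ') + 1] < 'a'  (the digit-log test both Pythons contain verbatim)
def isDigitLog (log : String) : Bool :=
  match PySem.Str.pyGet? log (PySem.Str.find log " " + 1) with
  | some c => decide (c < 'a')
  | none => true   -- Python raises IndexError here; excluded by Pre_order_logs

-- sort_key: [id, *words] = log.split(); words.append(id); return ' '.join(words)
def sortKey (log : String) : String :=
  match PySem.Str.split₀ log with
  | [] => ""       -- Python raises ValueError here; unreachable on letter logs
  | id :: words => PySem.Str.join " " (words ++ [id])

def order_logs (logs : List String) : List String :=
  let p := logs.foldl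
    (fun (acc : List String × List String) log =>
      if isDigitLog log then (acc.1, acc.2 ++ [log]) else (acc.1 ++ [log], acc.2))
    ([], [])
  PySem.List.sorted p.1 sortKey ++ p.2

-- ===== PORT B =====
def order_logs_alt (logs : List String) : List String :=
  PySem.List.sorted2 logs
    (fun log => if isDigitLog log then (1 : Int) else 0)
    (fun log => if isDigitLog log then "" else sortKey log)

-- ===== PRECONDITION & SPEC =====
-- Pre_ excludes exactly the logs on which A's indexing log[log.find(' ')+1] raises IndexError.
def Pre_order_logs (logs : List String) : Prop :=
  ∀ log ∈ logs, PySem.Str.find log " " + 1 < PySem.Str.len log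
instance (logs : List String) : Decidable (Pre_order_logs logs) := by unfold Pre_order_logs; infer_instance
def pvWitness_order_logs : List String := ["dig1 8 1 5 1", "let1 art can", "dig2 3 6", "let2 own kit dig"]

def Spec_order_logs (logs : List String) (out : List String) : Prop := out = order_logs_alt logs
instance (logs : List String) (out : List String) : Decidable (Spec_order_logs logs out) := by unfold Spec_order_logs; infer_instance

-- ===== CLAIM (what is proved, stated in full; the proofs are below) =====
def Claim_equal_order_logs : Prop := ∀ (logs : List String), Dom_order_logs logs → Pre_order_logs logs → Spec_order_logs logs (order_logs logs)

-- ===== LEMMAS AND PROOFS =====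

-- B's tuple-key "before" relation, written out
def before2 (a b : String) : Bool :=
  decide ((if isDigitLog a then (1:Int) else 0) < (if isDigitLog b then (1:Int) else 0)) ||
  (!decide ((if isDigitLog b then (1:Int) else 0) < (if isDigitLog a then (1:Int) else 0)) &&
   decide ((if isDigitLog a then "" else sortKey a) < (if isDigitLog b then "" else sortKey b)))

def beforeK (a b : String) : Bool := decide (sortKey a < sortKey b)

lemma before2_digit_false (x a : String) (hx : isDigitLog x = true) :
    before2 x a = false := by
  unfold before2
  by_cases h : isDigitLog a <;> simp [h, hx]

lemma before2_letter_digit (x a : String) (hx : isDigitLog x = false)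
    (ha : isDigitLog a = true) : before2 x a = true := by
  unfold before2; simp [hx, ha]

lemma before2_letter_letter (x a : String) (hx : isDigitLog x = false)
    (ha : isDigitLog a = false) : before2 x a = beforeK x a := by
  unfold before2 beforeK; simp [hx, ha]

lemma insertBy_before2_digit (x : String) (hx : isDigitLog x = true) (ys : List String) :
    PySem.List.insertBy before2 x ys = ys ++ [x] :=
  PySem.List.insertBy_of_forall_not_before before2 x ys (fun y _ => before2_digit_false x y hx)

lemma insertBy_before2_letter (x : String) (hx : isDigitLog x = false)
    (L D : List String) (hL : ∀ a ∈ L, isDigitLog a = false) (hD : ∀ a ∈ D, isDigitLog a = true) :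
    PySem.List.insertBy before2 x (L ++ D) = PySem.List.insertBy beforeK x L ++ D := by
  induction L with
  | nil =>
    simp only [List.nil_append, PySem.List.insertBy]
    cases D with
    | nil => rfl
    | cons d ds =>
      simp [PySem.List.insertBy,
        before2_letter_digit x d hx (hD d List.mem_cons_self)]
  | cons y ys ih =>
    have hy : isDigitLog y = false := hL y List.mem_cons_self
    have hb : before2 x y = beforeK x y := before2_letter_letter x y hx hy
    cases h : beforeK x y with
    | true => simp [PySem.List.insertBy, hb, h]
    | false =>
      simp only [List.cons_append, PySem.List.insertBy, hb, h,
        Bool.false_eq_true, if_false]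
      rw [ih (fun a ha => hL a (List.mem_cons_of_mem y ha))]

-- main invariant: the single stable sort under the tuple key equals
-- "insertion-sort the letters so far, digits appended in order"
lemma main_invariant (logs : List String) :
    ∀ (L D : List String), (∀ a ∈ L, isDigitLog a = false) → (∀ a ∈ D, isDigitLog a = true) →
    logs.foldl (fun acc x => PySem.List.insertBy before2 x acc) (L ++ D)
      = (logs.filter (fun x => !isDigitLog x)).foldl
          (fun acc x => PySem.List.insertBy beforeK x acc) L
        ++ (D ++ logs.filter (fun x => isDigitLog x)) := by
  induction logs with
  | nil => intro L D _ _; simp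
  | cons x rest ih =>
    intro L D hL hD
    cases hx : isDigitLog x with
    | true =>
      simp only [List.foldl_cons, List.filter_cons, hx, Bool.not_true]
      rw [insertBy_before2_digit x hx, List.append_assoc]
      rw [ih L (D ++ [x]) hL (by intro a ha; rcases List.mem_append.mp ha with h | h
                                 · exact hD a h
                                 · simp at h; subst h; exact hx)]
      simp
    | false =>
      simp only [List.foldl_cons, List.filter_cons, hx, Bool.not_false]
      rw [insertBy_before2_letter x hx L D hL hD]
      exact ih (PySem.List.insertBy beforeK x L) D
        (by intro a ha; rcases (PySem.List.mem_insertBy beforeK x a L).mp ha with h | h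
            · subst h; exact hx
            · exact hL a h) hD

lemma partition_foldl (logs : List String) :
    ∀ (L D : List String),
    logs.foldl (fun (acc : List String × List String) log =>
        if isDigitLog log then (acc.1, acc.2 ++ [log]) else (acc.1 ++ [log], acc.2)) (L, D)
      = (L ++ logs.filter (fun x => !isDigitLog x), D ++ logs.filter (fun x => isDigitLog x)) := by
  induction logs with
  | nil => intro L D; simp
  | cons x rest ih =>
    intro L D
    cases hx : isDigitLog x with
    | true =>
      simp only [List.foldl_cons, List.filter_cons, hx, Bool.not_true, if_true]
      rw [ih L (D ++ [x])]; simp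
    | false =>
      simp only [List.foldl_cons, List.filter_cons, hx, Bool.not_false,
        Bool.false_eq_true, if_false]
      rw [ih (L ++ [x]) D]; simp

theorem order_logs_spec : Claim_equal_order_logs := by
  intro logs _ _
  unfold Spec_order_logs order_logs order_logs_alt
  rw [partition_foldl logs [] []]
  show PySem.List.sorted (List.filter (fun x => !isDigitLog x) logs) sortKey ++
      List.filter (fun x => isDigitLog x) logs
    = logs.foldl (fun acc x => PySem.List.insertBy before2 x acc) []
  rw [PySem.List.sorted_eq_foldl_insertBy]
  have h := main_invariant logs [] [] (by simp) (by simp)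
  simp only [List.nil_append] at h
  exact h.symm
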